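-- pv_equiv track=rewrite | github.com/MrBrantCode/unitest_baseline | mut_generate/mist_train_cf/cf_12145/solution.py | check_subset_and_count
-- ===== SOURCE A (Python) =====
-- def check_subset_and_count(subsetArray, supersetArray):
--     """
--     Checks if subsetArray is a subset of supersetArray, considering duplicate elements,
--     and returns a dictionary containing the count of occurrences of each element in
--     subsetArray within supersetArray.
--
--     Args:
--         subsetArray (list): The potential subset list of integers.
--         supersetArray (list): The potential superset list of integers.
--
--     Returns:
--         tuple: A boolean indicating whether subsetArray is a subset of supersetArray,
--                and a dictionary containing the count of occurrences of each element in
--                subsetArray within supersetArray.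
--     """
--     subset_dict = {}
--
--     # Count occurrences of each element in subsetArray
--     for num in subsetArray:
--         if num in subset_dict:
--             subset_dict[num] += 1
--         else:
--             subset_dict[num] = 1
--
--     # Check if subsetArray is a subset of supersetArray
--     for num in subset_dict:
--         if subset_dict[num] > supersetArray.count(num):
--             return False, {}
--
--     # Count occurrences of each element in subsetArray within supersetArray
--     occurrences_dict = {}
--     for num in subset_dict:
--         occurrences_dict[num] = supersetArray.count(num)
--
--     return True, occurrences_dict
-- ===== SOURCE B (Python) =====
-- def check_subset_and_count(subsetArray, supersetArray):
--     # Sort-and-merge: walk sorted copies with two pointers, counting each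
--     # distinct subset value's run and its total occurrences in the superset.
--     sub_sorted = sorted(subsetArray)
--     sup_sorted = sorted(supersetArray)
--     counts = {}
--     n, m = len(sub_sorted), len(sup_sorted)
--     i = j = 0
--     while i < n:
--         v = sub_sorted[i]
--         run_end = i
--         while run_end < n and sub_sorted[run_end] == v:
--             run_end += 1
--         while j < m and sup_sorted[j] < v:
--             j += 1
--         have = 0
--         while j < m and sup_sorted[j] == v:
--             have += 1
--             j += 1
--         if run_end - i > have:
--             return False, {}
--         counts[v] = have
--         i = run_end
--     occurrences_dict = {}
--     for v in dict.fromkeys(subsetArray):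
--         occurrences_dict[v] = counts[v]
--     return True, occurrences_dict
-- ===== Notes on version B (the rewrite author's own statement) =====
-- stated objective: alternative
-- what changed: B sorts copies of both lists and does a two-pointer merge over runs of equal values, computing per-value subset need and superset count in one synchronized sweep, instead of A's hash-dict counting with repeated supersetArray.count scans.
import Mathlib
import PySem

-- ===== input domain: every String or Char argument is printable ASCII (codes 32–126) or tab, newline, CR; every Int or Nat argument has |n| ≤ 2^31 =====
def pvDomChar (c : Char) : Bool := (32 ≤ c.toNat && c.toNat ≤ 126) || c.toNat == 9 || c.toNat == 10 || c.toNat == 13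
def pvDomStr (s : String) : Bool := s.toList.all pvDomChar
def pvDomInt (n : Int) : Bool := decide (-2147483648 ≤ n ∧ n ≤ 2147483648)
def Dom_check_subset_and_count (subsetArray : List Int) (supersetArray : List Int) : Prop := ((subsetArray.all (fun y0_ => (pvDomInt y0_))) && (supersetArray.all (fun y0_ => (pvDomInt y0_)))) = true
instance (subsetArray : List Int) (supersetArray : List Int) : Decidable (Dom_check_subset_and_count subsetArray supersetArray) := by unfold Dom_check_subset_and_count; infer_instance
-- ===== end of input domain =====

-- B replaces A's dict-counting plus repeated supersetArray.count scans by a sort-then-merge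
-- two-pointer sweep over sorted copies (alternative algorithm; return value identical).

-- ===== PORT A =====
def check_subset_and_count (subsetArray : List Int) (supersetArray : List Int) : Bool × (List (Int × Int)) :=
  -- for num in subsetArray: if num in subset_dict: += 1 else: = 1
  let subset_dict : PySem.Dict Int Int :=
    subsetArray.foldl
      (fun d num => if d.contains num then d.insert num (d.getD num 0 + 1) else d.insert num 1)
      PySem.Dict.empty
  -- for num in subset_dict: if subset_dict[num] > supersetArray.count(num): return False, {}
  if subset_dict.keys.any (fun num => subset_dict.getD num 0 > (supersetArray.count num : Int)) then
    (false, [])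
  else
    -- for num in subset_dict: occurrences_dict[num] = supersetArray.count(num)
    let occurrences_dict : PySem.Dict Int Int :=
      subset_dict.keys.foldl (fun occ num => occ.insert num (supersetArray.count num : Int)) PySem.Dict.empty
    (true, occurrences_dict.items)

-- ===== PORT B =====
-- while run_end < n and sub_sorted[run_end] == v: run_end += 1  (and the matching 'have' loop):
-- count the leading run of v, return (run length, rest of the list)
def pvCountRun (v : Int) : List Int → Nat × List Int
  | [] => (0, [])
  | x :: xs =>
    if x == v then
      let r := pvCountRun v xs
      (r.1 + 1, r.2)
    else (0, x :: xs)

-- while j < m and sup_sorted[j] < v: j += 1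
def pvSkipLt (v : Int) : List Int → List Int
  | [] => []
  | x :: xs => if x < v then pvSkipLt v xs else x :: xs

theorem pvCountRun_snd_length_le (v : Int) (l : List Int) : (pvCountRun v l).2.length ≤ l.length := by
  induction l with
  | nil => simp [pvCountRun]
  | cons x xs ih =>
    by_cases h : (x == v) = true
    · simp only [pvCountRun, h, if_pos]
      exact Nat.le_succ_of_le ih
    · simp [pvCountRun, h]

-- the outer 'while i < n' loop: one iteration per run of equal values in sub
def pvMerge (sub sup : List Int) (counts : PySem.Dict Int Int) : Option (PySem.Dict Int Int) :=
  match sub with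
  | [] => some counts
  | v :: rest =>
    let r := pvCountRun v rest               -- run of v in the rest of sub (need = r.1 + 1)
    let sup1 := pvSkipLt v sup               -- skip superset elements < v
    let s := pvCountRun v sup1               -- have = s.1, remaining superset = s.2
    if s.1 < r.1 + 1 then none
    else pvMerge r.2 s.2 (counts.insert v (s.1 : Int))
termination_by sub.length
decreasing_by
  exact Nat.lt_succ_of_le (pvCountRun_snd_length_le v rest)

def check_subset_and_count_alt (subsetArray : List Int) (supersetArray : List Int) : Bool × (List (Int × Int)) :=
  let sub_sorted := PySem.List.sorted subsetArray (fun x => x) false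
  let sup_sorted := PySem.List.sorted supersetArray (fun x => x) false
  match pvMerge sub_sorted sup_sorted PySem.Dict.empty with
  | none => (false, [])
  | some counts =>
    -- occurrences_dict built in first-occurrence order: for v in dict.fromkeys(subsetArray)
    (true, ((PySem.List.dedup subsetArray).foldl
              (fun occ v => occ.insert v (counts.getD v 0)) PySem.Dict.empty).items)

-- ===== PRECONDITION & SPEC =====
def Spec_check_subset_and_count (subsetArray : List Int) (supersetArray : List Int) (out : Bool × (List (Int × Int))) : Prop := out = check_subset_and_count_alt subsetArray supersetArray
instance (subsetArray : List Int) (supersetArray : List Int) (out : Bool × (List (Int × Int))) : Decidable (Spec_check_subset_and_count subsetArray supersetArray out) := by unfold Spec_check_subset_and_count; infer_instance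

-- ===== CLAIM (what is proved, stated in full; the proofs are below) =====
def Claim_equal_check_subset_and_count : Prop := ∀ (subsetArray : List Int) (supersetArray : List Int), Dom_check_subset_and_count subsetArray supersetArray → Spec_check_subset_and_count subsetArray supersetArray (check_subset_and_count subsetArray supersetArray)

-- ===== LEMMAS AND PROOFS =====

-- A's counting loop (branch on membership) equals the unconditional get-and-insert loop, hence the counter.
theorem pv_foldA_eq (l : List Int) (d : PySem.Dict Int Int) :
    l.foldl (fun d num => if d.contains num then d.insert num (d.getD num 0 + 1) else d.insert num 1) d
      = l.foldl (fun d x => d.insert x (d.getD x 0 + 1)) d := by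
  induction l generalizing d with
  | nil => rfl
  | cons x l ih =>
    simp only [List.foldl_cons]
    by_cases h : d.contains x = true
    · rw [if_pos h]; exact ih _
    · have h0 : d.getD x 0 = 0 := PySem.Dict.getD_of_not_contains d 0 (by simpa using h)
      rw [if_neg h, h0]
      exact ih _

-- On a list whose elements are all ≥ v, the run loop counts exactly the v's and leaves
-- the elements > v (with their order and sortedness).
theorem pvCountRun_sorted (v : Int) (l : List Int)
    (hp : l.Pairwise (· ≤ ·)) (hge : ∀ x ∈ l, v ≤ x) :
    pvCountRun v l = (l.count v, l.filter (fun x => decide (v < x))) := by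
  induction l with
  | nil => simp [pvCountRun]
  | cons x xs ih =>
    rcases List.pairwise_cons.mp hp with ⟨hx, hxs⟩
    by_cases h : x = v
    · subst h
      have ih' := ih hxs (fun y hy => hx y hy)
      simp [pvCountRun, ih']
    · have hvx : v < x := lt_of_le_of_ne (hge x (by simp)) (Ne.symm h)
      have hcount : (x :: xs).count v = 0 := by
        rw [List.count_eq_zero]
        intro hv
        rcases List.mem_cons.mp hv with hv | hv
        · exact h hv.symm
        · exact absurd (lt_of_lt_of_le hvx (hx v hv)) (lt_irrefl v)
      have hfilter : (x :: xs).filter (fun y => decide (v < y)) = x :: xs := by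
        rw [List.filter_eq_self]
        intro y hy
        rcases List.mem_cons.mp hy with hy | hy
        · subst hy; simpa using hvx
        · simpa using lt_of_lt_of_le hvx (hx y hy)
      simp only [pvCountRun, beq_iff_eq, if_neg h, hcount, hfilter]
  
-- note: List.count's BEq on Int is lawful, so count_cons etc. apply

-- On a sorted list, the skip loop drops exactly the elements < v.
theorem pvSkipLt_sorted (v : Int) (l : List Int) (hp : l.Pairwise (· ≤ ·)) :
    pvSkipLt v l = l.filter (fun x => decide (v ≤ x)) := by
  induction l with
  | nil => simp [pvSkipLt]
  | cons x xs ih =>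
    rcases List.pairwise_cons.mp hp with ⟨hx, hxs⟩
    by_cases h : x < v
    · have : ¬ (v ≤ x) := not_le.mpr h
      simp [pvSkipLt, h, this, ih hxs]
    · have hvx : v ≤ x := not_lt.mp h
      have hfilter : xs.filter (fun y => decide (v ≤ y)) = xs := by
        rw [List.filter_eq_self]
        intro y hy
        simpa using le_trans hvx (hx y hy)
      simp [pvSkipLt, h, hvx, hfilter]

-- One merge step on sorted data: the run loop on the subset tail counts v's and leaves the
-- elements > v; skipping then counting on the sorted superset yields v's full count and the > v tail.
theorem pv_step_facts (v : Int) (rest sup : List Int)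
    (hsub : (v :: rest).Pairwise (· ≤ ·)) (hsup : sup.Pairwise (· ≤ ·)) :
    pvCountRun v rest = (rest.count v, rest.filter (fun x => decide (v < x))) ∧
    pvCountRun v (pvSkipLt v sup) = (sup.count v, sup.filter (fun x => decide (v < x))) := by
  rcases List.pairwise_cons.mp hsub with ⟨hge, hrest⟩
  constructor
  · exact pvCountRun_sorted v rest hrest hge
  · rw [pvSkipLt_sorted v sup hsup]
    have hp' : (sup.filter (fun x => decide (v ≤ x))).Pairwise (· ≤ ·) := hsup.filter _
    have hge' : ∀ x ∈ sup.filter (fun x => decide (v ≤ x)), v ≤ x := by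
      intro x hx
      exact of_decide_eq_true (List.mem_filter.mp hx).2
    rw [pvCountRun_sorted v _ hp' hge']
    have h1 : (sup.filter (fun x => decide (v ≤ x))).count v = sup.count v :=
      List.count_filter (by simp)
    have h2 : (sup.filter (fun x => decide (v ≤ x))).filter (fun x => decide (v < x))
        = sup.filter (fun x => decide (v < x)) := by
      rw [List.filter_filter]
      apply List.filter_congr
      intro a _
      by_cases h : v < a
      · simp [h, le_of_lt h]
      · simp [h]
    rw [h1, h2]

-- The merge succeeds iff every subset value has enough occurrences, and then the resulting
-- dict gives each subset value its superset count.
theorem pvMerge_spec (sub sup : List Int) (counts : PySem.Dict Int Int) :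
    sub.Pairwise (· ≤ ·) → sup.Pairwise (· ≤ ·) →
    (((∃ v ∈ sub, sup.count v < sub.count v) → pvMerge sub sup counts = none) ∧
     ((∀ v ∈ sub, sub.count v ≤ sup.count v) →
        ∃ D, pvMerge sub sup counts = some D ∧
          ∀ w, D.getD w 0 = if w ∈ sub then (sup.count w : Int) else counts.getD w 0)) := by
  induction sub, sup, counts using pvMerge.induct with
  | case1 sup counts =>
    intro _ _
    refine ⟨?_, ?_⟩
    · rintro ⟨v, hv, -⟩; exact absurd hv (List.not_mem_nil)
    · intro _
      exact ⟨counts, by simp [pvMerge], fun w => by simp⟩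
  | case2 sup counts v rest r sup1 s hfail =>
    intro hsub hsup
    obtain ⟨hr, hs⟩ := pv_step_facts v rest sup hsub hsup
    have hstep : pvMerge (v :: rest) sup counts = none := by
      simp only [pvMerge]
      split
      · rfl
      · exact absurd hfail ‹_›
    have hfail' : (pvCountRun v (pvSkipLt v sup)).1 < (pvCountRun v rest).1 + 1 := hfail
    rw [hr, hs] at hfail'
    constructor
    · intro _; exact hstep
    · intro h
      exfalso
      have h1 := h v (by simp)
      have h2 : (v :: rest).count v = rest.count v + 1 := by simp
      omega
  | case3 sup counts v rest r sup1 s hok ih =>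
    intro hsub hsup
    have hge := (List.pairwise_cons.mp hsub).1
    have hrest := (List.pairwise_cons.mp hsub).2
    obtain ⟨hr, hs⟩ := pv_step_facts v rest sup hsub hsup
    have hr' : r = (rest.count v, rest.filter (fun x => decide (v < x))) := hr
    have hs' : s = (sup.count v, sup.filter (fun x => decide (v < x))) := hs
    rw [hr', hs'] at ih hok
    dsimp only at ih
    have hok' : ¬ (sup.count v < rest.count v + 1) := by simpa using hok
    specialize ih (hrest.filter _) (hsup.filter _)
    -- abbreviations
    have hmemR : ∀ w, w ∈ rest.filter (fun x => decide (v < x)) ↔ w ∈ rest ∧ v < w := by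
      intro w; simp [List.mem_filter]
    have hcntR : ∀ w, v < w →
        (rest.filter (fun x => decide (v < x))).count w = rest.count w := by
      intro w hw; exact List.count_filter (by simpa using hw)
    have hcntS : ∀ w, v < w →
        (sup.filter (fun x => decide (v < x))).count w = sup.count w := by
      intro w hw; exact List.count_filter (by simpa using hw)
    have hsplit : ∀ w, w ∈ (v :: rest) ↔ w = v ∨ w ∈ rest.filter (fun x => decide (v < x)) := by
      intro w
      constructor
      · intro hw
        rcases List.mem_cons.mp hw with hw | hw
        · exact Or.inl hw
        · by_cases hwv : w = v
          · exact Or.inl hwv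
          · exact Or.inr ((hmemR w).mpr ⟨hw, lt_of_le_of_ne (hge w hw) (Ne.symm hwv)⟩)
      · rintro (hw | hw)
        · simp [hw]
        · exact List.mem_cons_of_mem _ ((hmemR w).mp hw).1
    have hstep : pvMerge (v :: rest) sup counts
        = pvMerge (rest.filter (fun x => decide (v < x))) (sup.filter (fun x => decide (v < x)))
            (counts.insert v ((sup.count v : Int))) := by
      simp only [pvMerge]
      rw [hr, hs]
      split
      · rename_i hlt
        exact absurd hlt (by simpa using hok')
      · rfl
    constructor
    · rintro ⟨w, hw, hcnt⟩
      rw [hstep]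
      rcases (hsplit w).mp hw with hwv | hwR
      · subst hwv
        exfalso
        have : (w :: rest).count w = rest.count w + 1 := by simp
        omega
      · apply ih.1
        have hvw : v < w := ((hmemR w).mp hwR).2
        have hwne : w ≠ v := ne_of_gt hvw
        refine ⟨w, hwR, ?_⟩
        rw [hcntR w hvw, hcntS w hvw]
        have : (v :: rest).count w = rest.count w := by simp [Ne.symm hwne]
        omega
    · intro h
      have hforall : ∀ w ∈ rest.filter (fun x => decide (v < x)),
          (rest.filter (fun x => decide (v < x))).count w
            ≤ (sup.filter (fun x => decide (v < x))).count w := by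
        intro w hwR
        have hvw : v < w := ((hmemR w).mp hwR).2
        have hwne : w ≠ v := ne_of_gt hvw
        rw [hcntR w hvw, hcntS w hvw]
        have := h w (List.mem_cons_of_mem _ ((hmemR w).mp hwR).1)
        simpa [Ne.symm hwne] using this
      obtain ⟨D, hD, hDl⟩ := ih.2 hforall
      refine ⟨D, by rw [hstep]; exact hD, ?_⟩
      intro w
      rw [hDl w]
      by_cases hwR : w ∈ rest.filter (fun x => decide (v < x))
      · have hvw : v < w := ((hmemR w).mp hwR).2
        rw [if_pos hwR, if_pos ((hsplit w).mpr (Or.inr hwR)), hcntS w hvw]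
      · rw [if_neg hwR, PySem.Dict.getD_insert]
        by_cases hwv : w = v
        · subst hwv
          rw [if_pos rfl, if_pos (by simp)]
        · rw [if_neg hwv, if_neg (by
            intro hmem
            rcases (hsplit w).mp hmem with h1 | h1
            · exact hwv h1
            · exact hwR h1)]

-- Bridging facts between the original lists and their sorted copies.
theorem pv_sorted_count (l : List Int) (w : Int) :
    (PySem.List.sorted l (fun x => x) false).count w = l.count w :=
  (PySem.List.sorted_perm l (fun x => x) false).count_eq w

-- ===== VERDICT (by name: the statement is the Claim_ definition above) =====
theorem check_subset_and_count_spec : Claim_equal_check_subset_and_count := by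
  intro sub sup _
  unfold Spec_check_subset_and_count check_subset_and_count check_subset_and_count_alt
  dsimp only
  rw [pv_foldA_eq, PySem.Dict.foldl_insert_getD_add_one_eq_counter]
  have hsubp : (PySem.List.sorted sub (fun x => x) false).Pairwise (· ≤ ·) := by
    simpa using PySem.List.sorted_pairwise sub (fun x => x)
  have hsupp : (PySem.List.sorted sup (fun x => x) false).Pairwise (· ≤ ·) := by
    simpa using PySem.List.sorted_pairwise sup (fun x => x)
  have spec := pvMerge_spec (PySem.List.sorted sub (fun x => x) false)
      (PySem.List.sorted sup (fun x => x) false) PySem.Dict.empty hsubp hsupp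
  by_cases hex : ∃ v ∈ sub, sup.count v < sub.count v
  · -- some subset value is missing occurrences: both sides return (false, [])
    have hA : ((PySem.Dict.counter sub).keys.any
        (fun num => decide ((PySem.Dict.counter sub).getD num 0 > (sup.count num : Int)))) = true := by
      obtain ⟨v, hv, hlt⟩ := hex
      refine List.any_eq_true.mpr ⟨v, ?_, ?_⟩
      · rw [PySem.Dict.keys_counter]
        simpa [PySem.Set.mem_ofList] using hv
      · rw [PySem.Dict.getD_counter]
        simp only [gt_iff_lt, decide_eq_true_eq]
        exact_mod_cast hlt
    have hB : pvMerge (PySem.List.sorted sub (fun x => x) false)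
        (PySem.List.sorted sup (fun x => x) false) PySem.Dict.empty = none := by
      apply spec.1
      obtain ⟨v, hv, hlt⟩ := hex
      exact ⟨v, by simpa [PySem.List.mem_sorted] using hv, by rw [pv_sorted_count, pv_sorted_count]; exact hlt⟩
    rw [hB, if_pos hA]
  · -- every subset value has enough occurrences: both sides return (true, same items)
    push Not at hex
    have hA : ((PySem.Dict.counter sub).keys.any
        (fun num => decide ((PySem.Dict.counter sub).getD num 0 > (sup.count num : Int)))) = false := by
      rw [List.any_eq_false]
      intro v hv
      rw [PySem.Dict.keys_counter] at hv
      rw [PySem.Dict.getD_counter]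
      simp only [gt_iff_lt, decide_eq_true_eq, not_lt]
      exact_mod_cast hex v (by simpa [PySem.Set.mem_ofList] using hv)
    have hall : ∀ v ∈ PySem.List.sorted sub (fun x => x) false,
        (PySem.List.sorted sub (fun x => x) false).count v
          ≤ (PySem.List.sorted sup (fun x => x) false).count v := by
      intro v hv
      rw [pv_sorted_count, pv_sorted_count]
      exact hex v (by simpa [PySem.List.mem_sorted] using hv)
    obtain ⟨D, hD, hDl⟩ := spec.2 hall
    rw [hA, hD]
    simp only [Bool.false_eq_true, if_false]
    -- both branches return (true, _); compare the items lists
    refine congrArg (Prod.mk true) ?_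
    rw [PySem.Dict.keys_counter]
    rw [PySem.Dict.items_foldl_insert_fresh (k := fun a => a) (v := fun a => (sup.count a : Int))
          (PySem.Set.ofList sub) PySem.Dict.empty
          (by intro a _; exact PySem.Dict.contains_empty a)
          (by simp)]
    rw [PySem.List.dedup_eq_ofList,
        PySem.Dict.items_foldl_insert_fresh (k := fun a => a) (v := fun a => D.getD a 0)
          (PySem.Set.ofList sub) PySem.Dict.empty
          (by intro a _; exact PySem.Dict.contains_empty a)
          (by simp)]
    simp only [PySem.Dict.empty, List.nil_append]
    apply List.map_congr_left
    intro a ha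
    have hamem : a ∈ sub := by rw [PySem.Set.mem_ofList] at ha; exact ha
    have := hDl a
    rw [if_pos (by simpa [PySem.List.mem_sorted] using hamem), pv_sorted_count] at this
    rw [this]
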